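-- pv_equiv track=rewrite | github.com/MadhuGit-hub/GFG-POTD-60-days | day-19.py | largestSwap
-- ===== SOURCE A (Python) =====
-- def largestSwap(s):
--     arr = list(s)
--     n = len(arr)
--
--     # store last occurrence of each character
--     last = {arr[i]: i for i in range(n)}
--
--     for i in range(n):
--         # check for larger characters
--         for ch in range(9, -1, -1):
--             ch = str(ch)
--             if ch > arr[i] and ch in last and last[ch] > i:
--                 j = last[ch]
--                 arr[i], arr[j] = arr[j], arr[i]
--                 return "".join(arr)
--
--     return s
-- ===== SOURCE B (Python) =====
-- def largestSwap(s):
--     arr = list(s)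
--     max_idx = -1
--     best_i = best_j = -1
--     for i in range(len(arr) - 1, -1, -1):
--         c = arr[i]
--         if c.isdigit() and (max_idx == -1 or c > arr[max_idx]):
--             max_idx = i
--         elif max_idx != -1 and c < arr[max_idx]:
--             best_i, best_j = i, max_idx
--     if best_i == -1:
--         return s
--     arr[best_i], arr[best_j] = arr[best_j], arr[best_i]
--     return "".join(arr)
-- ===== Notes on version B (the rewrite author's own statement) =====
-- stated objective: faster
-- what changed: Replaced the last-occurrence dict plus a left-to-right outer loop with an inner 9..0 digit scan by a single right-to-left pass that maintains the rightmost maximal digit index and overwrites the best swap pair, so no dict and no inner loop remain.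
import Mathlib
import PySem

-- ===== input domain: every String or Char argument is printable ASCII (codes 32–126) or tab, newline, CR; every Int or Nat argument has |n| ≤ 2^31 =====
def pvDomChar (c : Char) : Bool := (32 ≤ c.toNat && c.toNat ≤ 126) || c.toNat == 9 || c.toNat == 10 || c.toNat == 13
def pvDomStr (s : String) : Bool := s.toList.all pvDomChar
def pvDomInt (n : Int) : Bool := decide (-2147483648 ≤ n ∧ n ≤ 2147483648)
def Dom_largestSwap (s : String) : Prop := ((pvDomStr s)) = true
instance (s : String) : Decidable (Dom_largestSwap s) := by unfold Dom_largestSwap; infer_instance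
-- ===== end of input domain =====

-- B replaces A's last-occurrence dict + outer loop with inner 9..0 digit scan by one
-- right-to-left pass tracking the rightmost maximal digit (objective: faster, constant factor).

-- shared helpers: Python indexing arr[i] and the tuple swap arr[i], arr[j] = arr[j], arr[i];
-- every use below has the index provably in range (it comes from range(...) or a stored index),
-- so the getD default and .toNat are never hit outside Python's own behaviour.
def pvGetC (l : List Char) (i : Int) : Char := (PySem.List.pyGet? l i).getD ' '
def pySwap2 (l : List Char) (i j : Int) : List Char :=
  let a := pvGetC l i
  let b := pvGetC l j
  (l.set i.toNat b).set j.toNat a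

-- ===== PORT A =====
-- inner loop: for ch in range(9,-1,-1): ch = str(ch); … (str(d) for d in 0..9 is one digit
-- character, and comparison of 1-character Python strings is Char comparison)
def aInner (arr : List Char) (last : PySem.Dict Char Int) (i : Int) : List Char → Option (List Char)
  | [] => none
  | ch :: rest =>
    if pvGetC arr i < ch ∧ last.contains ch = true ∧ i < last.getD ch 0 then
      some (pySwap2 arr i (last.getD ch 0))
    else aInner arr last i rest

def aOuter (arr : List Char) (last : PySem.Dict Char Int) : List Int → Option (List Char)
  | [] => none
  | i :: rest =>
    match aInner arr last i ((PySem.List.pyRange 9 (-1) (-1)).map (fun d => Char.ofNat (48 + d.toNat))) with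
    | some r => some r
    | none => aOuter arr last rest

def largestSwap (s : String) : String :=
  let arr := s.toList
  let n : Int := arr.length
  let last := (PySem.List.pyRange 0 n 1).foldl (fun d i => PySem.Dict.insert d (pvGetC arr i) i) PySem.Dict.empty
  match aOuter arr last (PySem.List.pyRange 0 n 1) with
  | some arr2 => String.ofList arr2
  | none => s

-- ===== PORT B =====
-- state (max_idx, best_i, best_j); one fold over range(n-1, -1, -1)
def bStep (arr : List Char) (st : Int × Int × Int) (i : Int) : Int × Int × Int :=
  let c := pvGetC arr i
  if PySem.Chars.isdigit c = true ∧ (st.1 = -1 ∨ pvGetC arr st.1 < c) then (i, st.2.1, st.2.2)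
  else if st.1 ≠ -1 ∧ c < pvGetC arr st.1 then (st.1, i, st.1)
  else st

def largestSwap_alt (s : String) : String :=
  let arr := s.toList
  let st := (PySem.List.pyRange ((arr.length : Int) - 1) (-1) (-1)).foldl (bStep arr) (-1, -1, -1)
  if st.2.1 = -1 then s
  else String.ofList (pySwap2 arr st.2.1 st.2.2)

-- ===== PRECONDITION & SPEC =====
def Spec_largestSwap (s : String) (out : String) : Prop := out = largestSwap_alt s
instance (s : String) (out : String) : Decidable (Spec_largestSwap s out) := by unfold Spec_largestSwap; infer_instance

-- ===== CLAIM (what is proved, stated in full; the proofs are below) =====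
def Claim_equal_largestSwap : Prop := ∀ (s : String), Dom_largestSwap s → Spec_largestSwap s (largestSwap s)

-- ===== LEMMAS AND PROOFS =====

-- spec layer: gc l k = l[k] with Nat index; pickFrom l k = B's max_idx over indices ≥ k;
-- bestFrom l k = B's (best_i, best_j) over indices ≥ k; lastOccUpto l c k = last index < k with l[.] = c.
def gc (l : List Char) (k : Nat) : Char := l.getD k ' '

def pickFrom (l : List Char) (k : Nat) : Int :=
  if _h : k < l.length then
    if PySem.Chars.isdigit (gc l k) = true ∧ (pickFrom l (k+1) = -1 ∨ pvGetC l (pickFrom l (k+1)) < gc l k)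
    then (k : Int) else pickFrom l (k+1)
  else -1
termination_by l.length - k

def bestFrom (l : List Char) (k : Nat) : Int × Int :=
  if _h : k < l.length then
    if pickFrom l (k+1) ≠ -1 ∧ gc l k < pvGetC l (pickFrom l (k+1))
    then ((k : Int), pickFrom l (k+1)) else bestFrom l (k+1)
  else (-1, -1)
termination_by l.length - k

def lastOccUpto (l : List Char) (c : Char) : Nat → Option Int
  | 0 => none
  | k+1 => if gc l k = c then some (k : Int) else lastOccUpto l c k

def lastD (l : List Char) : PySem.Dict Char Int :=
  (PySem.List.pyRange 0 (l.length : Int) 1).foldl (fun d i => PySem.Dict.insert d (pvGetC l i) i) PySem.Dict.empty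

def digitChars : List Char := ['9','8','7','6','5','4','3','2','1','0']

lemma pvGetC_natCast (l : List Char) (k : Nat) : pvGetC l (k : Int) = gc l k := by
  simp [pvGetC, gc, List.getD_eq_getElem?_getD]

lemma digits_eval :
    (PySem.List.pyRange 9 (-1) (-1)).map (fun d => Char.ofNat (48 + d.toNat)) = digitChars := by
  decide

lemma digit_mem (c : Char) (h : PySem.Chars.isdigit c = true) : c ∈ digitChars := by
  simp [PySem.Chars.isdigit] at h
  obtain ⟨h1, h2⟩ := h
  have h1' : 48 ≤ c.toNat := h1
  have h2' : c.toNat ≤ 57 := h2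
  have hc : Char.ofNat c.toNat = c := Char.ofNat_toNat c
  interval_cases h : c.toNat <;> (rw [← hc]; decide)

lemma mem_digits_isdigit (c : Char) (h : c ∈ digitChars) : PySem.Chars.isdigit c = true := by
  fin_cases h <;> decide

-- the dict comprehension: lookup = last occurrence
lemma lastD_get? (l : List Char) (c : Char) : ∀ k, k ≤ l.length →
    ((PySem.List.pyRange 0 (k : Int) 1).foldl
      (fun d i => PySem.Dict.insert d (pvGetC l i) i) PySem.Dict.empty).get? c = lastOccUpto l c k := by
  intro k
  induction k with
  | zero => intro _; simp [PySem.List.pyRange_one_eq_nil (by omega : (0:Int) ≤ 0), lastOccUpto]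
  | succ k ih =>
    intro hk
    simp only [Nat.cast_add, Nat.cast_one]
    rw [PySem.List.pyRange_one_succ_right (by omega : (0:Int) ≤ (k:Int)), List.foldl_append]
    simp only [List.foldl_cons, List.foldl_nil]
    rw [PySem.Dict.get?_insert]
    rw [pvGetC_natCast]
    simp only [lastOccUpto]
    by_cases h : gc l k = c
    · simp [h]
    · simp [h, Ne.symm h, ih (by omega)]

lemma lastOcc_some (l : List Char) (c : Char) : ∀ k, ∀ j, lastOccUpto l c k = some j →
    0 ≤ j ∧ j.toNat < k ∧ gc l j.toNat = c ∧ ∀ m : Nat, m < k → (j : Int) < m → gc l m ≠ c := by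
  intro k
  induction k with
  | zero => intro j h; simp [lastOccUpto] at h
  | succ k ih =>
    intro j h
    simp only [lastOccUpto] at h
    by_cases hc : gc l k = c
    · rw [if_pos hc] at h
      obtain rfl : (k : Int) = j := by exact_mod_cast Option.some.inj h
      refine ⟨by positivity, by simp, by simpa using hc, ?_⟩
      intro m hm hj
      omega
    · rw [if_neg hc] at h
      obtain ⟨h0, h1, h2, h3⟩ := ih j h
      refine ⟨h0, by omega, h2, ?_⟩
      intro m hm hj
      rcases Nat.lt_succ_iff_lt_or_eq.mp hm with hm' | rfl
      · exact h3 m hm' hj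
      · exact hc

lemma lastOcc_ge (l : List Char) (c : Char) : ∀ k, ∀ m : Nat, m < k → gc l m = c →
    ∃ j, lastOccUpto l c k = some j ∧ (m : Int) ≤ j := by
  intro k
  induction k with
  | zero => intro m hm; omega
  | succ k ih =>
    intro m hm hc
    simp only [lastOccUpto]
    by_cases hk : gc l k = c
    · exact ⟨(k : Int), by simp [hk], by exact_mod_cast Nat.le_of_lt_succ hm⟩
    · rw [if_neg hk]
      rcases Nat.lt_succ_iff_lt_or_eq.mp hm with hm' | rfl
      · exact ih m hm' hc
      · exact absurd hc hk

lemma lastD_get?' (l : List Char) (c : Char) : (lastD l).get? c = lastOccUpto l c l.length := by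
  rw [lastD]
  exact lastD_get? l c l.length (le_refl _)

-- a firing inner-loop condition at index k means ch occurs at some index > k
lemma fire_occ (l : List Char) (k : Nat) (ch : Char)
    (hcont : (lastD l).contains ch = true) (hgt : (k : Int) < (lastD l).getD ch 0) :
    ∃ m : Nat, k < m ∧ m < l.length ∧ gc l m = ch := by
  rw [PySem.Dict.contains_eq_isSome_get?, lastD_get?'] at hcont
  obtain ⟨j, hj⟩ := Option.isSome_iff_exists.mp hcont
  obtain ⟨hj0, hjn, hjc, _⟩ := lastOcc_some l ch l.length j hj
  rw [PySem.Dict.getD_eq_get?_getD, lastD_get?', hj] at hgt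
  simp only [Option.getD_some] at hgt
  exact ⟨j.toNat, by omega, hjn, hjc⟩

-- characterization of pickFrom: -1 and no digit in [k, n), or the rightmost maximal digit index
lemma pick_spec (l : List Char) : ∀ d k, l.length - k = d →
    (pickFrom l k = -1 ∧ ∀ m : Nat, k ≤ m → m < l.length → PySem.Chars.isdigit (gc l m) = false)
    ∨ (∃ p : Nat, pickFrom l k = (p : Int) ∧ k ≤ p ∧ p < l.length ∧
        PySem.Chars.isdigit (gc l p) = true ∧
        (∀ m : Nat, k ≤ m → m < l.length → PySem.Chars.isdigit (gc l m) = true → gc l m ≤ gc l p) ∧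
        (∀ m : Nat, p < m → m < l.length → PySem.Chars.isdigit (gc l m) = true → gc l m < gc l p)) := by
  intro d
  induction d with
  | zero =>
    intro k hd
    left
    refine ⟨by rw [pickFrom, dif_neg (by omega)], ?_⟩
    intro m hm1 hm2
    omega
  | succ d ih =>
    intro k hd
    have hk : k < l.length := by omega
    rw [pickFrom, dif_pos hk]
    rcases ih (k+1) (by omega) with ⟨hpick, hnone⟩ | ⟨p, hp, hkp, hpn, hdig, hmax, hstrict⟩
    · by_cases hc : PySem.Chars.isdigit (gc l k) = true ∧
          (pickFrom l (k+1) = -1 ∨ pvGetC l (pickFrom l (k+1)) < gc l k)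
      · rw [if_pos hc]
        right
        refine ⟨k, rfl, le_refl k, hk, hc.1, ?_, ?_⟩
        · intro m h1 h2 h3
          rcases Nat.eq_or_lt_of_le h1 with rfl | h1'
          · exact le_refl _
          · exact absurd h3 (by simp [hnone m h1' h2])
        · intro m h1 h2 h3
          exact absurd h3 (by simp [hnone m (by omega) h2])
      · rw [if_neg hc]
        left
        refine ⟨hpick, ?_⟩
        intro m h1 h2
        rcases Nat.eq_or_lt_of_le h1 with rfl | h1'
        · by_contra hbad
          rw [Bool.not_eq_false] at hbad
          exact hc ⟨hbad, Or.inl hpick⟩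
        · exact hnone m h1' h2
    · have hpv : pvGetC l (pickFrom l (k+1)) = gc l p := by
        rw [hp, pvGetC_natCast]
      by_cases hc : PySem.Chars.isdigit (gc l k) = true ∧
          (pickFrom l (k+1) = -1 ∨ pvGetC l (pickFrom l (k+1)) < gc l k)
      · rw [if_pos hc]
        right
        have hlt : gc l p < gc l k := by
          rcases hc.2 with he | hlt'
          · rw [hp] at he
            exact absurd he (by omega)
          · rwa [hpv] at hlt'
        refine ⟨k, rfl, le_refl k, hk, hc.1, ?_, ?_⟩
        · intro m h1 h2 h3
          rcases Nat.eq_or_lt_of_le h1 with rfl | h1'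
          · exact le_refl _
          · exact le_of_lt (lt_of_le_of_lt (hmax m h1' h2 h3) hlt)
        · intro m h1 h2 h3
          exact lt_of_le_of_lt (hmax m (by omega) h2 h3) hlt
      · rw [if_neg hc]
        right
        refine ⟨p, hp, by omega, hpn, hdig, ?_, hstrict⟩
        intro m h1 h2 h3
        rcases Nat.eq_or_lt_of_le h1 with rfl | h1'
        · push Not at hc
          obtain ⟨hne, hge⟩ := hc h3
          rwa [hpv] at hge
        · exact hmax m h1' h2 h3

lemma aInner_none (l : List Char) (last : PySem.Dict Char Int) (i : Int) :
    ∀ ds : List Char, (∀ ch ∈ ds, ¬(pvGetC l i < ch ∧ last.contains ch = true ∧ i < last.getD ch 0)) →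
    aInner l last i ds = none := by
  intro ds
  induction ds with
  | nil => intro _; rfl
  | cons ch rest ih =>
    intro h
    rw [aInner, if_neg (h ch (by simp))]
    exact ih fun c hc => h c (by simp [hc])

lemma aInner_find (l : List Char) (last : PySem.Dict Char Int) (i : Int) (chm : Char)
    (hc : pvGetC l i < chm ∧ last.contains chm = true ∧ i < last.getD chm 0) :
    ∀ ds : List Char, ds.Pairwise (· > ·) → chm ∈ ds →
    (∀ ch ∈ ds, (pvGetC l i < ch ∧ last.contains ch = true ∧ i < last.getD ch 0) → ch ≤ chm) →
    aInner l last i ds = some (pySwap2 l i (last.getD chm 0)) := by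
  intro ds
  induction ds with
  | nil => intro _ h; simp at h
  | cons ch rest ih =>
    intro hp hmem hmax
    rcases List.mem_cons.mp hmem with rfl | hmem'
    · rw [aInner, if_pos hc]
    · by_cases hch : pvGetC l i < ch ∧ last.contains ch = true ∧ i < last.getD ch 0
      · have h1 : ch ≤ chm := hmax ch (by simp) hch
        have h2 : ch > chm := (List.pairwise_cons.mp hp).1 chm hmem'
        exact absurd h1 (not_le.mpr h2)
      · rw [aInner, if_neg hch]
        exact ih (List.pairwise_cons.mp hp).2 hmem' fun c hc' => hmax c (by simp [hc'])

-- the inner 9..0 loop at index k does exactly what B's best-pair test does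
lemma inner_eq (l : List Char) (k : Nat) (_hk : k < l.length) :
    aInner l (lastD l) (k : Int) digitChars =
      if pickFrom l (k+1) ≠ -1 ∧ gc l k < pvGetC l (pickFrom l (k+1))
      then some (pySwap2 l (k : Int) (pickFrom l (k+1))) else none := by
  by_cases hc : pickFrom l (k+1) ≠ -1 ∧ gc l k < pvGetC l (pickFrom l (k+1))
  · rw [if_pos hc]
    rcases pick_spec l (l.length - (k+1)) (k+1) rfl with ⟨hpick, _⟩ | ⟨p, hp, hkp, hpn, hdig, hmax, hstrict⟩
    · exact absurd hpick hc.1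
    · have hget : (lastD l).get? (gc l p) = some (p : Int) := by
        obtain ⟨j, hj, hjge⟩ := lastOcc_ge l (gc l p) l.length p hpn rfl
        obtain ⟨hj0, hjn, hjc, _⟩ := lastOcc_some l (gc l p) l.length j hj
        have hle : j.toNat ≤ p := by
          by_contra hgt
          push Not at hgt
          have := hstrict j.toNat hgt hjn (by rw [hjc]; exact hdig)
          rw [hjc] at this
          exact absurd this (lt_irrefl _)
        have hje : j = (p : Int) := by omega
        rw [lastD_get?' l (gc l p), hj, hje]
      have hcond : pvGetC l (k : Int) < gc l p ∧ (lastD l).contains (gc l p) = true ∧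
          (k : Int) < (lastD l).getD (gc l p) 0 := by
        refine ⟨?_, ?_, ?_⟩
        · rw [pvGetC_natCast]
          have h2 := hc.2
          rwa [hp, pvGetC_natCast] at h2
        · rw [PySem.Dict.contains_eq_isSome_get?, hget]
          rfl
        · rw [PySem.Dict.getD_eq_get?_getD, hget]
          simp only [Option.getD_some]
          exact_mod_cast Nat.lt_of_lt_of_le (Nat.lt_succ_self k) hkp
      have hmax' : ∀ ch ∈ digitChars,
          (pvGetC l (k : Int) < ch ∧ (lastD l).contains ch = true ∧ (k : Int) < (lastD l).getD ch 0) →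
          ch ≤ gc l p := by
        intro ch hchmem hfire
        obtain ⟨m, hm1, hm2, hm3⟩ := fire_occ l k ch hfire.2.1 hfire.2.2
        have := hmax m (by omega) hm2 (by rw [hm3]; exact mem_digits_isdigit ch hchmem)
        rwa [hm3] at this
      rw [aInner_find l (lastD l) (k : Int) (gc l p) hcond digitChars (by decide)
            (digit_mem (gc l p) hdig) hmax']
      rw [PySem.Dict.getD_eq_get?_getD, hget, hp]
      rfl
  · rw [if_neg hc]
    apply aInner_none
    rintro ch hchmem ⟨hlt, hcont, hgt⟩
    obtain ⟨m, hm1, hm2, hm3⟩ := fire_occ l k ch hcont hgt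
    rcases pick_spec l (l.length - (k+1)) (k+1) rfl with ⟨_, hnone⟩ | ⟨p, hp, hkp, hpn, hdig, hmax, _⟩
    · have := hnone m (by omega) hm2
      rw [hm3, mem_digits_isdigit ch hchmem] at this
      exact absurd this (by simp)
    · push Not at hc
      have hch_le : ch ≤ gc l p := by
        have := hmax m (by omega) hm2 (by rw [hm3]; exact mem_digits_isdigit ch hchmem)
        rwa [hm3] at this
      have hklt : gc l k < pvGetC l (pickFrom l (k+1)) := by
        rw [hp, pvGetC_natCast]
        rw [pvGetC_natCast] at hlt
        exact lt_of_lt_of_le hlt hch_le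
      have := hc (by rw [hp]; omega)
      exact absurd hklt (not_lt.mpr this)

lemma aOuter_eq (l : List Char) : ∀ d k, l.length - k = d → k ≤ l.length →
    aOuter l (lastD l) (PySem.List.pyRange (k : Int) (l.length : Int) 1) =
      (if (bestFrom l k).1 = -1 then none
       else some (pySwap2 l (bestFrom l k).1 (bestFrom l k).2)) := by
  intro d
  induction d with
  | zero =>
    intro k hd hk
    have hke : k = l.length := by omega
    subst hke
    rw [PySem.List.pyRange_one_eq_nil (le_refl _), bestFrom, dif_neg (lt_irrefl _)]
    rfl
  | succ d ih =>
    intro k hd hk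
    have hkn : k < l.length := by omega
    rw [PySem.List.pyRange_one_cons (by exact_mod_cast hkn), aOuter, digits_eval,
        inner_eq l k hkn]
    by_cases hc : pickFrom l (k+1) ≠ -1 ∧ gc l k < pvGetC l (pickFrom l (k+1))
    · rw [if_pos hc]
      rw [show bestFrom l k = ((k : Int), pickFrom l (k+1)) from by
            rw [bestFrom, dif_pos hkn, if_pos hc]]
      rw [if_neg (by omega : ¬((k : Int) = -1))]
    · rw [if_neg hc]
      rw [show bestFrom l k = bestFrom l (k+1) from by rw [bestFrom, dif_pos hkn, if_neg hc]]
      rw [show ((k : Int) + 1) = ((k+1 : Nat) : Int) by push_cast; ring]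
      exact ih (k+1) (by omega) (by omega)

lemma bStep_eq (l : List Char) (k : Nat) (hk : k < l.length) :
    bStep l (pickFrom l (k+1), (bestFrom l (k+1)).1, (bestFrom l (k+1)).2) (k : Int)
      = (pickFrom l k, (bestFrom l k).1, (bestFrom l k).2) := by
  simp only [bStep, pvGetC_natCast]
  by_cases h1 : PySem.Chars.isdigit (gc l k) = true ∧
      (pickFrom l (k+1) = -1 ∨ pvGetC l (pickFrom l (k+1)) < gc l k)
  · rw [if_pos h1]
    have h2 : ¬(pickFrom l (k+1) ≠ -1 ∧ gc l k < pvGetC l (pickFrom l (k+1))) := by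
      rintro ⟨hne, hlt⟩
      rcases h1.2 with he | hlt2
      · exact hne he
      · exact absurd hlt (not_lt.mpr (le_of_lt hlt2))
    rw [show pickFrom l k = (k : Int) from by rw [pickFrom, dif_pos hk, if_pos h1],
        show bestFrom l k = bestFrom l (k+1) from by rw [bestFrom, dif_pos hk, if_neg h2]]
  · rw [if_neg h1]
    by_cases h2 : pickFrom l (k+1) ≠ -1 ∧ gc l k < pvGetC l (pickFrom l (k+1))
    · rw [if_pos h2]
      rw [show pickFrom l k = pickFrom l (k+1) from by rw [pickFrom, dif_pos hk, if_neg h1],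
          show bestFrom l k = ((k : Int), pickFrom l (k+1)) from by
            rw [bestFrom, dif_pos hk, if_pos h2]]
    · rw [if_neg h2]
      rw [show pickFrom l k = pickFrom l (k+1) from by rw [pickFrom, dif_pos hk, if_neg h1],
          show bestFrom l k = bestFrom l (k+1) from by rw [bestFrom, dif_pos hk, if_neg h2]]

lemma bFold (l : List Char) : ∀ k : Nat, k ≤ l.length →
    (PySem.List.pyRange ((k : Int) - 1) (-1) (-1)).foldl (bStep l)
        (pickFrom l k, (bestFrom l k).1, (bestFrom l k).2)
      = (pickFrom l 0, (bestFrom l 0).1, (bestFrom l 0).2) := by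
  intro k
  induction k with
  | zero =>
    intro _
    rw [show ((0:Nat):Int) - 1 = -1 by norm_num, PySem.List.pyRange_neg_one_eq_nil (by omega)]
    rfl
  | succ k ih =>
    intro hk
    have hkl : k < l.length := by omega
    rw [show (((k+1:Nat)):Int) - 1 = (k:Int) by push_cast; ring,
        PySem.List.pyRange_neg_one_cons (by omega : (-1:Int) < (k:Int)),
        List.foldl_cons, bStep_eq l k hkl]
    exact ih (by omega)

lemma A_eq (s : String) :
    largestSwap s =
      (if (bestFrom s.toList 0).1 = -1 then s
       else String.ofList (pySwap2 s.toList (bestFrom s.toList 0).1 (bestFrom s.toList 0).2)) := by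
  simp only [largestSwap]
  rw [show ((PySem.List.pyRange 0 ((s.toList.length : Int)) 1).foldl
        (fun d i => PySem.Dict.insert d (pvGetC s.toList i) i) PySem.Dict.empty) = lastD s.toList
      from rfl]
  have h := aOuter_eq s.toList s.toList.length 0 (by omega) (Nat.zero_le _)
  simp only [Nat.cast_zero] at h
  rw [h]
  by_cases hb : (bestFrom s.toList 0).1 = -1
  · rw [if_pos hb, if_pos hb]
  · rw [if_neg hb, if_neg hb]

lemma B_eq (s : String) :
    largestSwap_alt s =
      (if (bestFrom s.toList 0).1 = -1 then s
       else String.ofList (pySwap2 s.toList (bestFrom s.toList 0).1 (bestFrom s.toList 0).2)) := by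
  simp only [largestSwap_alt]
  have e1 : pickFrom s.toList s.toList.length = -1 := by
    rw [pickFrom, dif_neg (lt_irrefl _)]
  have e2 : bestFrom s.toList s.toList.length = (-1, -1) := by
    rw [bestFrom, dif_neg (lt_irrefl _)]
  have h := bFold s.toList s.toList.length (le_refl _)
  rw [e1, e2] at h
  rw [h]

-- ===== VERDICT (by name: the statement is the Claim_ definition above) =====
theorem largestSwap_spec : Claim_equal_largestSwap := by
  intro s _
  unfold Spec_largestSwap
  rw [A_eq, B_eq]
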